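-- pv_equiv track=rewrite | github.com/hasinakhurrum-ai/niffi-lora | model_selector.py | _prefer_code_models
-- ===== SOURCE A (Python) =====
-- _CODE_HEAVY_TASK_TYPES = frozenset({
--     "code", "server", "website", "tool", "self_improve", "upgrade_engine",
--     "optimize_runtime", "security_patch", "performance_tune", "test",
-- })
--
-- _CODE_PURPOSES = frozenset({"code", "repair"})
--
-- def _prefer_code_models(
--     candidates: list[str],
--     task_type: str | None,
--     purpose: str | None = None,
-- ) -> list[str]:
--     """Reorder candidates: prefer *coder*/*code* models for code-heavy tasks or purposes."""
--     code_heavy = (task_type and task_type in _CODE_HEAVY_TASK_TYPES) or (purpose and purpose in _CODE_PURPOSES)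
--     if not code_heavy:
--         return candidates
--     code_like = [c for c in candidates if "coder" in c.lower() or "code" in c.lower() or "deepseek" in c.lower()]
--     rest = [c for c in candidates if c not in code_like]
--     return code_like + rest if code_like else candidates
-- ===== SOURCE B (Python) =====
-- _CODE_HEAVY_TASK_TYPES = frozenset({
--     "code", "server", "website", "tool", "self_improve", "upgrade_engine",
--     "optimize_runtime", "security_patch", "performance_tune", "test",
-- })
--
-- _CODE_PURPOSES = frozenset({"code", "repair"})
--
--
-- def _is_code_like(c):
--     lc = c.lower()
--     # "coder" is subsumed by "code", so two checks suffice
--     return "code" in lc or "deepseek" in lc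
--
--
-- def _prefer_code_models(candidates, task_type, purpose=None):
--     """Reorder candidates: prefer coder/code models for code-heavy tasks or purposes.
--
--     Single stable sort on a binary key instead of two filter passes plus an
--     inner membership scan; Python's stable sort keeps original order within
--     each group, which is exactly the stable partition.
--     """
--     code_heavy = (task_type and task_type in _CODE_HEAVY_TASK_TYPES) or (purpose and purpose in _CODE_PURPOSES)
--     if not code_heavy:
--         return candidates
--     return sorted(candidates, key=lambda c: 0 if _is_code_like(c) else 1)
-- ===== Notes on version B (the rewrite author's own statement) =====
-- stated objective: idiomatic
-- what changed: Replaced the two list-comprehension passes (matching filter plus a rest pass with an inner membership scan) and the empty-match special case by a single stable sort on a binary key, which realises the same stable partition in one library call.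
import Mathlib
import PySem

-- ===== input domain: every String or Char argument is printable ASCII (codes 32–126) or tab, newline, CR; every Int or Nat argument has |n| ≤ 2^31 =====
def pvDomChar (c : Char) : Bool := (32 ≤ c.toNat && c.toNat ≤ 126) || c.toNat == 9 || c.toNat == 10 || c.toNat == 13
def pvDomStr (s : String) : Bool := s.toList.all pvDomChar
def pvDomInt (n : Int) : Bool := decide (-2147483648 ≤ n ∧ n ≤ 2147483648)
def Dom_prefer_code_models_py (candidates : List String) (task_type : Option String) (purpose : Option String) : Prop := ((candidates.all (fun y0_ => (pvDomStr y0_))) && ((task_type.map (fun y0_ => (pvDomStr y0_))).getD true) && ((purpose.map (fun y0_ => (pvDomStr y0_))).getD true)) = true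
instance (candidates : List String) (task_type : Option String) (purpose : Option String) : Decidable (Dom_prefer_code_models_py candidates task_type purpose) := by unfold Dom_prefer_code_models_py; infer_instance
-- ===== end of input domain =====

-- B replaces A's two filter passes (plus inner membership scan and empty-match special case)
-- by one stable sort on a binary key; return value proved equal on all inputs.


-- module constants (shared by both Python files)
def pvCodeHeavyTaskTypes : List String :=
  ["code", "server", "website", "tool", "self_improve", "upgrade_engine",
   "optimize_runtime", "security_patch", "performance_tune", "test"]

def pvCodePurposes : List String := ["code", "repair"]

-- 'task_type and task_type in S' / 'purpose and purpose in S' truthiness guard (same line in A and B)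
def pvCodeHeavy (task_type : Option String) (purpose : Option String) : Bool :=
  (match task_type with
   | none => false
   | some t => t ≠ "" && pvCodeHeavyTaskTypes.contains t) ||
  (match purpose with
   | none => false
   | some p => p ≠ "" && pvCodePurposes.contains p)

-- ===== PORT A =====
def prefer_code_models_py (candidates : List String) (task_type : Option String) (purpose : Option String) : List String :=
  if !pvCodeHeavy task_type purpose then candidates
  else
    let code_like := candidates.filter (fun c =>
      PySem.Str.isIn "coder" (PySem.Str.lower c) || PySem.Str.isIn "code" (PySem.Str.lower c) ||
      PySem.Str.isIn "deepseek" (PySem.Str.lower c))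
    let rest := candidates.filter (fun c => !code_like.contains c)
    if code_like ≠ [] then code_like ++ rest else candidates

-- ===== PORT B =====
-- "coder" is subsumed by "code", so two checks suffice
def pvIsCodeLike (c : String) : Bool :=
  let lc := PySem.Str.lower c
  PySem.Str.isIn "code" lc || PySem.Str.isIn "deepseek" lc

def prefer_code_models_py_alt (candidates : List String) (task_type : Option String) (purpose : Option String) : List String :=
  if !pvCodeHeavy task_type purpose then candidates
  else PySem.List.sorted candidates (fun c => if pvIsCodeLike c then (0 : Int) else 1) false

-- ===== PRECONDITION & SPEC =====
def Spec_prefer_code_models_py (candidates : List String) (task_type : Option String) (purpose : Option String) (out : List String) : Prop := out = prefer_code_models_py_alt candidates task_type purpose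
instance (candidates : List String) (task_type : Option String) (purpose : Option String) (out : List String) : Decidable (Spec_prefer_code_models_py candidates task_type purpose out) := by unfold Spec_prefer_code_models_py; infer_instance

-- ===== CLAIM (what is proved, stated in full; the proofs are below) =====
def Claim_equal_prefer_code_models_py : Prop := ∀ (candidates : List String) (task_type : Option String) (purpose : Option String), Dom_prefer_code_models_py candidates task_type purpose → Spec_prefer_code_models_py candidates task_type purpose (prefer_code_models_py candidates task_type purpose)

-- ===== LEMMAS AND PROOFS =====

-- a string containing "coder" contains "code"
theorem coder_imp_code (s : String) :
    PySem.Str.isIn "coder" s = true → PySem.Str.isIn "code" s = true := by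
  simp only [PySem.Str.isIn_iff_infix]
  intro h
  exact List.IsInfix.trans (by decide : "code".toList <:+: "coder".toList) h

theorem pred_eq (c : String) :
    (PySem.Str.isIn "coder" (PySem.Str.lower c) || PySem.Str.isIn "code" (PySem.Str.lower c) ||
      PySem.Str.isIn "deepseek" (PySem.Str.lower c)) = pvIsCodeLike c := by
  unfold pvIsCodeLike
  show _ = (PySem.Str.isIn "code" (PySem.Str.lower c) || PySem.Str.isIn "deepseek" (PySem.Str.lower c))
  cases h : PySem.Str.isIn "code" (PySem.Str.lower c) with
  | true => simp only [Bool.or_true, Bool.true_or]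
  | false =>
    have hc : PySem.Str.isIn "coder" (PySem.Str.lower c) = false := by
      cases hc : PySem.Str.isIn "coder" (PySem.Str.lower c) with
      | false => rfl
      | true => exact absurd (h ▸ coder_imp_code _ hc) Bool.false_ne_true
    simp only [hc, Bool.false_or]

-- inserting a key-0 element lands right after the key-0 prefix
theorem insertBy_partition {α : Type} (p : α → Bool) (x : α) (hx : p x = true) :
    ∀ (acc0 acc1 : List α), (∀ a ∈ acc0, p a = true) → (∀ a ∈ acc1, p a = false) →
      PySem.List.insertBy
        (fun a b => decide ((if p a then (0 : Int) else 1) < (if p b then (0 : Int) else 1)))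
        x (acc0 ++ acc1) = acc0 ++ x :: acc1 := by
  intro acc0
  induction acc0 with
  | nil =>
    intro acc1 _ h1
    cases acc1 with
    | nil => simp [PySem.List.insertBy]
    | cons y ys =>
      have hy : p y = false := h1 y (by simp)
      simp [PySem.List.insertBy, hx, hy]
  | cons z zs ih =>
    intro acc1 h0 h1
    have hz : p z = true := h0 z (by simp)
    simp only [List.cons_append, PySem.List.insertBy, hx, hz]
    simp [ih acc1 (fun a ha => h0 a (by simp [ha])) h1]

-- inserting a key-1 element lands at the very end
theorem insertBy_end {α : Type} (p : α → Bool) (x : α) (hx : p x = false) (l : List α) :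
    PySem.List.insertBy
      (fun a b => decide ((if p a then (0 : Int) else 1) < (if p b then (0 : Int) else 1)))
      x l = l ++ [x] := by
  apply PySem.List.insertBy_of_forall_not_before
  intro y _
  by_cases hy : p y = true <;> simp [hx, hy]

theorem foldl_insertBy_partition {α : Type} (p : α → Bool) (xs : List α) :
    ∀ (acc0 acc1 : List α), (∀ a ∈ acc0, p a = true) → (∀ a ∈ acc1, p a = false) →
      xs.foldl (fun acc x =>
          PySem.List.insertBy
            (fun a b => decide ((if p a then (0 : Int) else 1) < (if p b then (0 : Int) else 1)))
            x acc) (acc0 ++ acc1)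
        = (acc0 ++ xs.filter p) ++ (acc1 ++ xs.filter (fun c => !p c)) := by
  induction xs with
  | nil => intro acc0 acc1 _ _; simp
  | cons x xs ih =>
    intro acc0 acc1 h0 h1
    cases hx : p x with
    | true =>
      have := insertBy_partition p x hx acc0 acc1 h0 h1
      simp only [List.foldl_cons, this]
      have : acc0 ++ x :: acc1 = (acc0 ++ [x]) ++ acc1 := by simp
      rw [this, ih (acc0 ++ [x]) acc1
        (by intro a ha; rcases List.mem_append.mp ha with h | h
            · exact h0 a h
            · simp at h; simpa [h] using hx) h1]
      simp [hx]
    | false =>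
      simp only [List.foldl_cons, insertBy_end p x hx (acc0 ++ acc1)]
      have : acc0 ++ acc1 ++ [x] = acc0 ++ (acc1 ++ [x]) := by simp
      rw [this, ih acc0 (acc1 ++ [x]) h0
        (by intro a ha; rcases List.mem_append.mp ha with h | h
            · exact h1 a h
            · simp at h; simpa [h] using hx)]
      simp [hx]

theorem sorted_binary_key {α : Type} (p : α → Bool) (xs : List α) :
    PySem.List.sorted xs (fun c => if p c then (0 : Int) else 1) false
      = xs.filter p ++ xs.filter (fun c => !p c) := by
  rw [PySem.List.sorted_eq_foldl_insertBy]
  simpa using foldl_insertBy_partition p xs [] [] (by simp) (by simp)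

-- ===== VERDICT (by name: the statement is the Claim_ definition above) =====
theorem prefer_code_models_py_spec : Claim_equal_prefer_code_models_py := by
  intro candidates task_type purpose _
  unfold Spec_prefer_code_models_py prefer_code_models_py prefer_code_models_py_alt
  cases hcb : pvCodeHeavy task_type purpose with
  | false => simp
  | true =>
    simp only [Bool.not_true, Bool.false_eq_true, if_false]
    rw [sorted_binary_key pvIsCodeLike candidates]
    have hfilt : candidates.filter (fun c =>
        PySem.Str.isIn "coder" (PySem.Str.lower c) || PySem.Str.isIn "code" (PySem.Str.lower c) ||
        PySem.Str.isIn "deepseek" (PySem.Str.lower c)) = candidates.filter pvIsCodeLike := by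
      apply List.filter_congr; intro c _; exact pred_eq c
    rw [hfilt]
    by_cases hnil : candidates.filter pvIsCodeLike = []
    · simp only [hnil, ne_eq, not_true_eq_false, if_false]
      have hall : ∀ c ∈ candidates, pvIsCodeLike c = false := by
        intro c hc
        by_contra h
        have : c ∈ candidates.filter pvIsCodeLike :=
          List.mem_filter.mpr ⟨hc, by simpa using h⟩
        simp [hnil] at this
      have : candidates.filter (fun c => !pvIsCodeLike c) = candidates :=
        List.filter_eq_self.mpr (by intro c hc; simp [hall c hc])
      simp [this]
    · simp only [ne_eq, hnil, not_false_eq_true, if_true]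
      congr 1
      apply List.filter_congr
      intro c hc
      have hmem : (List.filter pvIsCodeLike candidates).contains c = pvIsCodeLike c := by
        cases hpc : pvIsCodeLike c with
        | true => simp [List.mem_filter, hc, hpc]
        | false => simp [List.mem_filter, hpc]
      rw [hmem]
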